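-- pv_equiv track=rewrite | github.com/haihaimx/HaloWebUI | backend/open_webui/utils/user_connections.py | _merge_missing
-- ===== SOURCE A (Python) =====
-- def _merge_missing(dst: dict, src: dict) -> tuple[dict, bool]:
--     """
--     Shallow-merge only missing keys from src into dst.
--     """
--     changed = False
--     out = dict(dst)
--     for k, v in src.items():
--         if k not in out:
--             out[k] = v
--             changed = True
--     return out, changed
-- ===== SOURCE B (Python) =====
-- def _merge_missing(dst: dict, src: dict) -> tuple[dict, bool]:
--     """
--     Shallow-merge only missing keys from src into dst.
--     """
--     full = {**src, **dst}   # union of the two key sets; dst's value wins on shared keys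
--     out = {**dst, **full}   # same mapping, reordered: dst's keys first, then src-only keys
--     return out, len(out) != len(dst)
-- ===== Notes on version B (the rewrite author's own statement) =====
-- stated objective: idiomatic
-- what changed: B has no loop, no membership test and no mutable flag: it builds the union in one dict-unpacking {**src, **dst} (dst wins on shared keys), restores A's key order with a second unpacking {**dst, **full}, and derives the changed flag from a length comparison.
import Mathlib
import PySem

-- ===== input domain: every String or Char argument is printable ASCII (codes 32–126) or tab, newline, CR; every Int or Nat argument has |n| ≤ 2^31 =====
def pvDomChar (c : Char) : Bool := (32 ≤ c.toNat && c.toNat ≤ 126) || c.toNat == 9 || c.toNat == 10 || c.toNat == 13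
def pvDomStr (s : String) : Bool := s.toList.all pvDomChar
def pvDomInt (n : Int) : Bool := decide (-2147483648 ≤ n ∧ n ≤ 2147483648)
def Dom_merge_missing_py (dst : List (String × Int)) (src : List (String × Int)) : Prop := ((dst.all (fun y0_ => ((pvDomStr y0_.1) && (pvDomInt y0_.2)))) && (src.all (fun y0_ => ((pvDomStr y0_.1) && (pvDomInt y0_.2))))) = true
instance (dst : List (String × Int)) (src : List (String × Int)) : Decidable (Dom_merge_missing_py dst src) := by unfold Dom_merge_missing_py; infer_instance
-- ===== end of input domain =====

-- B replaces A's copy-then-loop (membership test + mutable changed flag) by two loop-free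
-- dict unpackings ({**src, **dst}, then {**dst, **full} to restore key order) and a length
-- comparison for the flag; equivalence of return values is proved on all inputs.


-- ===== PORT A =====
-- out = dict(dst); for k, v in src.items(): if k not in out: out[k] = v; changed = True
def merge_missing_py (dst : List (String × Int)) (src : List (String × Int)) : (List (String × Int)) × Bool :=
  let r := (PySem.Dict.ofList src).items.foldl
    (fun (acc : PySem.Dict String Int × Bool) kv =>
      if acc.1.contains kv.1 then acc
      else (acc.1.insert kv.1 kv.2, true))
    (PySem.Dict.ofList dst, false)
  (r.1.items, r.2)

-- ===== PORT B =====
-- full = {**src, **dst}; out = {**dst, **full}; return out, len(out) != len(dst)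
def merge_missing_py_alt (dst : List (String × Int)) (src : List (String × Int)) : (List (String × Int)) × Bool :=
  let d := PySem.Dict.ofList dst
  let full := (PySem.Dict.ofList src).update d.items
  let out := d.update full.items
  (out.items, decide (out.size ≠ d.size))

-- ===== PRECONDITION & SPEC =====
def Spec_merge_missing_py (dst : List (String × Int)) (src : List (String × Int)) (out : (List (String × Int)) × Bool) : Prop := out = merge_missing_py_alt dst src
instance (dst : List (String × Int)) (src : List (String × Int)) (out : (List (String × Int)) × Bool) : Decidable (Spec_merge_missing_py dst src out) := by unfold Spec_merge_missing_py; infer_instance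

-- ===== CLAIM (what is proved, stated in full; the proofs are below) =====
def Claim_equal_merge_missing_py : Prop := ∀ (dst : List (String × Int)) (src : List (String × Int)), Dom_merge_missing_py dst src → Spec_merge_missing_py dst src (merge_missing_py dst src)

-- ===== LEMMAS AND PROOFS =====

-- A's loop, generalized: as long as the remaining keys are distinct and membership in the
-- accumulator agrees with membership in d on all remaining keys, the loop appends exactly
-- the d-missing pairs and the flag records whether any pair was missing.
theorem merge_aloop (d : PySem.Dict String Int) :
    ∀ (l : List (String × Int)) (acc : PySem.Dict String Int) (flag : Bool),
      (l.map Prod.fst).Nodup →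
      (∀ kv ∈ l, acc.contains kv.1 = d.contains kv.1) →
      (l.foldl (fun (acc : PySem.Dict String Int × Bool) kv =>
          if acc.1.contains kv.1 then acc
          else (acc.1.insert kv.1 kv.2, true)) (acc, flag))
        = (PySem.Dict.mk (acc.items ++ l.filter (fun kv => !(d.contains kv.1))),
           flag || l.any (fun kv => !(d.contains kv.1))) := by
  intro l
  induction l with
  | nil => intro acc flag _ _; simp
  | cons kv rest ih =>
    intro acc flag hnd hmem
    have hkv : acc.contains kv.1 = d.contains kv.1 := hmem kv (by simp)
    simp only [List.map_cons, List.nodup_cons] at hnd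
    by_cases h : d.contains kv.1 = true
    · have := ih acc flag hnd.2 (fun kv' h' => hmem kv' (List.mem_cons_of_mem _ h'))
      simp [hkv, h, this]
    · have h' : acc.contains kv.1 = false := by rw [hkv]; exact Bool.not_eq_true _ |>.mp h
      have hd : d.contains kv.1 = false := Bool.not_eq_true _ |>.mp h
      have hmem' : ∀ kv' ∈ rest, (acc.insert kv.1 kv.2).contains kv'.1 = d.contains kv'.1 := by
        intro kv' hr
        have hne : kv'.1 ≠ kv.1 := by
          intro he
          exact hnd.1 (he ▸ List.mem_map_of_mem hr)
        rw [PySem.Dict.contains_insert]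
        simp [hne, hmem kv' (List.mem_cons_of_mem _ hr)]
      have := ih (acc.insert kv.1 kv.2) true hnd.2 hmem'
      rw [List.foldl_cons, if_neg (by simp [h']), this,
        PySem.Dict.items_insert_of_not_contains _ _ h']
      simp [hd]

-- get? of a fold of inserts is unchanged on keys the folded list does not carry
theorem mm_get?_foldl_of_not_mem (l : List (String × Int)) :
    ∀ (s : PySem.Dict String Int) (k : String), k ∉ l.map Prod.fst →
      (l.foldl (fun (a : PySem.Dict String Int) p => a.insert p.1 p.2) s).get? k = s.get? k := by
  induction l with
  | nil => intro s k _; rfl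
  | cons p rest ih =>
    intro s k hk
    simp only [List.map_cons, List.mem_cons, not_or] at hk
    rw [List.foldl_cons, ih _ _ hk.2, PySem.Dict.get?_insert_of_ne _ _ hk.1]

-- get? of a fold of inserts on a key the folded (nodup-keyed) list carries is that value
theorem mm_get?_foldl_of_mem (l : List (String × Int)) :
    ∀ (s : PySem.Dict String Int) (k : String) (v : Int),
      (l.map Prod.fst).Nodup → (k, v) ∈ l →
      (l.foldl (fun (a : PySem.Dict String Int) p => a.insert p.1 p.2) s).get? k = some v := by
  induction l with
  | nil => intro s k v _ h; cases h
  | cons p rest ih =>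
    intro s k v hnd hm
    simp only [List.map_cons, List.nodup_cons] at hnd
    cases hm with
    | head =>
      rw [List.foldl_cons, mm_get?_foldl_of_not_mem rest _ _ hnd.1,
        PySem.Dict.get?_insert_self]
    | tail _ hm =>
      rw [List.foldl_cons]
      exact ih _ _ _ hnd.2 hm

-- a map that fixes every element of a list is the identity on it
theorem mm_map_id {α : Type} (f : α → α) :
    ∀ L : List α, (∀ p ∈ L, f p = p) → L.map f = L := by
  intro L
  induction L with
  | nil => intro _; rfl
  | cons p rest ih =>
    intro h
    rw [List.map_cons, h p (by simp), ih (fun q hq => h q (List.mem_cons_of_mem _ hq))]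

-- the overwrite map of an insert does not change the d-missing part of a list
theorem mm_filter_map (d : PySem.Dict String Int) (k : String) (v : Int)
    (hk : d.contains k = true) :
    ∀ L : List (String × Int),
      ((L.map (fun p => if p.1 == k then (k, v) else p)).filter (fun p => !(d.contains p.1)))
        = L.filter (fun p => !(d.contains p.1)) := by
  intro L
  induction L with
  | nil => rfl
  | cons p rest ih =>
    by_cases hp : p.1 = k
    · have h1 : (p.1 == k) = true := by simp [hp]
      have h2 : (!(d.contains k)) = false := by simp [hk]
      have h3 : (!(d.contains p.1)) = false := by rw [hp]; exact h2
      rw [List.map_cons, if_pos h1, List.filter_cons_of_neg (by simp [h2]),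
        List.filter_cons_of_neg (by simp [h3]), ih]
    · have h1 : (p.1 == k) = false := by simp [hp]
      rw [List.map_cons, if_neg (by simp [h1])]
      by_cases hq : d.contains p.1 = true
      · rw [List.filter_cons_of_neg (by simp [hq]), List.filter_cons_of_neg (by simp [hq]), ih]
      · have hq' : d.contains p.1 = false := Bool.not_eq_true _ |>.mp hq
        rw [List.filter_cons_of_pos (by simp [hq']), List.filter_cons_of_pos (by simp [hq']), ih]

-- inserting a key that d already has does not change the d-missing part of the items
theorem mm_filter_insert (d acc : PySem.Dict String Int) (k : String) (v : Int)
    (hk : d.contains k = true) :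
    (acc.insert k v).items.filter (fun p => !(d.contains p.1))
      = acc.items.filter (fun p => !(d.contains p.1)) := by
  by_cases hc : acc.contains k = true
  · rw [PySem.Dict.items_insert_of_contains _ _ hc, mm_filter_map d k v hk]
  · rw [PySem.Dict.items_insert_of_not_contains _ _ (Bool.not_eq_true _ |>.mp hc)]
    rw [List.filter_append, List.filter_cons_of_neg (by simp [hk])]
    simp

-- folding inserts whose keys d already has does not change the d-missing part of the items
theorem mm_filter_foldl (d : PySem.Dict String Int) (l : List (String × Int))
    (hl : ∀ kv ∈ l, d.contains kv.1 = true) :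
    ∀ acc : PySem.Dict String Int,
      ((l.foldl (fun (a : PySem.Dict String Int) p => a.insert p.1 p.2) acc).items.filter
        (fun p => !(d.contains p.1)))
      = acc.items.filter (fun p => !(d.contains p.1)) := by
  induction l with
  | nil => intro acc; rfl
  | cons p rest ih =>
    intro acc
    rw [List.foldl_cons,
      ih (fun kv h => hl kv (List.mem_cons_of_mem _ h)) (acc.insert p.1 p.2),
      mm_filter_insert d acc p.1 p.2 (hl p (by simp))]

-- B's second unpacking, generalized: starting from d extended by fresh pairs `extra`,
-- folding inserts of a nodup-keyed list whose d-shared pairs carry d's own values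
-- appends exactly the d-missing pairs.
theorem mm_bloop (d : PySem.Dict String Int) (hd : d.keys.Nodup) :
    ∀ (l extra : List (String × Int)),
      (l.map Prod.fst).Nodup →
      (∀ kv ∈ l, d.contains kv.1 = true → d.get? kv.1 = some kv.2) →
      (∀ p ∈ extra, d.contains p.1 = false) →
      (∀ kv ∈ l, ∀ p ∈ extra, kv.1 ≠ p.1) →
      (l.foldl (fun (a : PySem.Dict String Int) p => a.insert p.1 p.2)
          (PySem.Dict.mk (d.items ++ extra)))
        = PySem.Dict.mk (d.items ++ extra ++ l.filter (fun kv => !(d.contains kv.1))) := by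
  intro l
  induction l with
  | nil => intro extra _ _ _ _; simp
  | cons kv rest ih =>
    intro extra hnd hval hex hcross
    simp only [List.map_cons, List.nodup_cons] at hnd
    have hcont : (PySem.Dict.mk (d.items ++ extra)).contains kv.1 = d.contains kv.1 := by
      show ((d.items ++ extra).any fun p => p.1 == kv.1) = d.contains kv.1
      rw [List.any_append]
      have hone : (extra.any fun p => p.1 == kv.1) = false := by
        rw [List.any_eq_false]
        intro p hp
        simpa using (hcross kv (by simp) p hp).symm
      rw [hone]
      simp [PySem.Dict.contains]
    rw [List.foldl_cons]
    by_cases h : d.contains kv.1 = true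
    · -- shared key: the insert overwrites in place with the value d already holds
      have hc : (PySem.Dict.mk (d.items ++ extra)).contains kv.1 = true := hcont.trans h
      have hget : d.get? kv.1 = some kv.2 := hval kv (by simp) h
      have hmapd : d.items.map (fun p => if p.1 == kv.1 then (kv.1, kv.2) else p) = d.items := by
        apply mm_map_id
        intro p hp
        by_cases hpk : p.1 = kv.1
        · have hpg : d.get? p.1 = some p.2 := PySem.Dict.get?_of_mem_items _ hp hd
          rw [hpk, hget] at hpg
          have hpv : p.2 = kv.2 := (Option.some.injEq _ _ ▸ hpg).symm
          have hpe : p = (kv.1, kv.2) := Prod.ext_iff.mpr ⟨hpk, hpv⟩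
          rw [if_pos (by simp [hpk]), hpe]
        · rw [if_neg (by simp [hpk])]
      have hmape : extra.map (fun p => if p.1 == kv.1 then (kv.1, kv.2) else p) = extra := by
        apply mm_map_id
        intro p hp
        have hne : p.1 ≠ kv.1 := by
          intro he
          rw [← he] at h
          rw [hex p hp] at h
          cases h
        rw [if_neg (by simp [hne])]
      have hins : (PySem.Dict.mk (d.items ++ extra)).insert kv.1 kv.2
          = PySem.Dict.mk (d.items ++ extra) := by
        rw [PySem.Dict.insert, if_pos hc]
        show PySem.Dict.mk ((d.items ++ extra).map _) = _
        rw [List.map_append, hmapd, hmape]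
      rw [hins, ih extra hnd.2 (fun kv' h' hc' => hval kv' (by simp [h']) hc') hex
        (fun kv' h' => hcross kv' (by simp [h']))]
      rw [List.filter_cons_of_neg (by simp [h])]
    · -- fresh key: the insert appends; it joins `extra`
      have hc : (PySem.Dict.mk (d.items ++ extra)).contains kv.1 = false :=
        hcont.trans (Bool.not_eq_true _ |>.mp h)
      have hins : (PySem.Dict.mk (d.items ++ extra)).insert kv.1 kv.2
          = PySem.Dict.mk (d.items ++ (extra ++ [kv])) := by
        rw [PySem.Dict.insert, if_neg (by simp [hc])]
        show PySem.Dict.mk ((d.items ++ extra) ++ [(kv.1, kv.2)]) = _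
        simp
      rw [hins, ih (extra ++ [kv]) hnd.2
        (fun kv' h' hc' => hval kv' (by simp [h']) hc')
        (by
          intro p hp
          rcases List.mem_append.mp hp with hp' | hp'
          · exact hex p hp'
          · simp only [List.mem_singleton] at hp'
            rw [hp']; exact Bool.not_eq_true _ |>.mp h)
        (by
          intro kv' h' p hp
          rcases List.mem_append.mp hp with hp' | hp'
          · exact hcross kv' (by simp [h']) p hp'
          · simp only [List.mem_singleton] at hp'
            rw [hp']
            intro he
            exact hnd.1 (he ▸ List.mem_map_of_mem h'))]
      rw [List.filter_cons_of_pos (by simp [Bool.not_eq_true _ |>.mp h])]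
      simp

theorem merge_any_iff_filter_ne (l : List (String × Int)) (p : String × Int → Bool) :
    (l.any p) = decide (l.filter p ≠ []) := by
  induction l with
  | nil => simp
  | cons kv rest ih =>
    by_cases h : p kv = true <;> simp [h, ih]

-- ===== VERDICT (by name: the statement is the Claim_ definition above) =====
theorem merge_missing_py_spec : Claim_equal_merge_missing_py := by
  intro dst src _
  unfold Spec_merge_missing_py merge_missing_py merge_missing_py_alt
  set d := PySem.Dict.ofList dst with hd
  set s := PySem.Dict.ofList src with hs
  have hdnd : d.keys.Nodup := PySem.Dict.nodup_keys_ofList dst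
  have hsnd : (s.items.map Prod.fst).Nodup := PySem.Dict.nodup_keys_ofList src
  have hdnd' : (d.items.map Prod.fst).Nodup := hdnd
  -- A's loop result
  have hA := merge_aloop d s.items d false hsnd (fun _ _ => rfl)
  -- full = {**src, **dst}
  have hfullnd : ((s.update d.items).items.map Prod.fst).Nodup :=
    PySem.Dict.nodup_keys_update _ _ hsnd
  -- shared keys of full carry d's own values
  have hval : ∀ kv ∈ (s.update d.items).items, d.contains kv.1 = true → d.get? kv.1 = some kv.2 := by
    intro kv hm hc
    have h1 : (s.update d.items).get? kv.1 = some kv.2 :=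
      PySem.Dict.get?_of_mem_items _ hm hfullnd
    have h2 : ∃ v, (kv.1, v) ∈ d.items ∧ d.get? kv.1 = some v := by
      have hsome : (d.get? kv.1).isSome := by
        rw [← PySem.Dict.contains_eq_isSome_get?]; exact hc
      rcases Option.isSome_iff_exists.mp hsome with ⟨v, hv⟩
      exact ⟨v, PySem.Dict.mem_items_of_get?_eq_some _ hv, hv⟩
    rcases h2 with ⟨v, hvm, hvg⟩
    have h3 : (s.update d.items).get? kv.1 = some v :=
      mm_get?_foldl_of_mem d.items s kv.1 v hdnd' hvm
    rw [h1] at h3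
    rw [hvg, Option.some.injEq]
    exact (Option.some.injEq _ _ ▸ h3).symm
  -- the d-missing part of full's items is that of s's items
  have hfilter : (s.update d.items).items.filter (fun p => !(d.contains p.1))
      = s.items.filter (fun p => !(d.contains p.1)) := by
    apply mm_filter_foldl d d.items
    intro kv hm
    show (d.items.any fun p => p.1 == kv.1) = true
    exact List.any_eq_true.mpr ⟨kv, hm, by simp⟩
  -- out = {**dst, **full}
  have hB := mm_bloop d hdnd (s.update d.items).items [] hfullnd hval (by simp) (by simp)
  simp only [List.append_nil] at hB
  have hBd : d.update (s.update d.items).items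
      = PySem.Dict.mk (d.items ++ s.items.filter (fun kv => !(d.contains kv.1))) := by
    rw [← hfilter]
    exact hB
  simp only [hA, hBd, PySem.Dict.size]
  refine Prod.ext rfl ?_
  show (false || s.items.any fun kv => !(d.contains kv.1))
      = decide ((d.items ++ s.items.filter fun kv => !(d.contains kv.1)).length ≠ d.items.length)
  rw [Bool.false_or, merge_any_iff_filter_ne, List.length_append]
  rcases (s.items.filter (fun kv => !(d.contains kv.1))) with _ | ⟨a, t⟩ <;> simp
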